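-- pv_equiv track=rewrite | github.com/morpana/dep_data | phase.py | getPeriods
-- ===== SOURCE A (Python) =====
-- def getPeriods(sequence):
--     zeros = []
--     for i in range(1,len(sequence)):
--         if sequence[i-1] < 0 and sequence[i] > 0:
--             zeros.append(i)
--     periods = []
--     for i in range(1,len(zeros)):
--         periods.append((zeros[i-1],zeros[i]))
--     return periods
-- ===== SOURCE B (Python) =====
-- def getPeriods(sequence):
--     periods = []
--     prev = None
--     for i, (a, b) in enumerate(zip(sequence, sequence[1:]), 1):
--         if a < 0 and b > 0:
--             if prev is not None:
--                 periods.append((prev, i))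
--             prev = i
--     return periods
-- ===== Notes on version B (the rewrite author's own statement) =====
-- stated objective: simpler
-- what changed: The two index-based passes (build the zeros list, then pair consecutive entries by index) are fused into one pass over adjacent element pairs that keeps only the previous crossing index in a scalar, emitting each pair as the next crossing is found.
import Mathlib
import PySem

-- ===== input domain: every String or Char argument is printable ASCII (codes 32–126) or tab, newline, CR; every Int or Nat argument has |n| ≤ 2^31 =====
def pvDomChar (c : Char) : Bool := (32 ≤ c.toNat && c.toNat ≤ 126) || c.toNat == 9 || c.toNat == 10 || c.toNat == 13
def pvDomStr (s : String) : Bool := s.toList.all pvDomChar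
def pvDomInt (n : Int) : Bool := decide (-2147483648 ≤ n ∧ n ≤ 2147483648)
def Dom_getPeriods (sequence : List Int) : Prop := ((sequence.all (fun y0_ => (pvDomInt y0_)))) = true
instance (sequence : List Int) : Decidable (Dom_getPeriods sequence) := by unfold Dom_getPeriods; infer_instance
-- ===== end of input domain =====

-- B fuses A's two passes into one pass over adjacent element pairs keeping only the previous
-- crossing index in a scalar; same return value, no side effects in either version.

-- ===== PORT A =====
-- A: first loop collects crossing indices into `zeros`, second loop pairs consecutive entries by index.
def getPeriods (sequence : List Int) : List (Int × Int) :=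
  let zeros : List Int :=
    (PySem.List.pyRange 1 (sequence.length : Int)).foldl
      (fun acc i =>
        if PySem.List.pyGetD sequence (i - 1) 0 < 0 ∧ 0 < PySem.List.pyGetD sequence i 0 then
          acc ++ [i]
        else acc) []
  (PySem.List.pyRange 1 (zeros.length : Int)).foldl
    (fun acc i => acc ++ [(PySem.List.pyGetD zeros (i - 1) 0, PySem.List.pyGetD zeros i 0)]) []

-- ===== PORT B =====
-- B: one loop over enumerate(zip(sequence, sequence[1:]), 1); state = (prev, periods).
def getPeriods_alt (sequence : List Int) : List (Int × Int) :=
  ((PySem.List.enumerate (sequence.zip (PySem.List.slice sequence (some 1))) 1).foldl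
    (fun (st : Option Int × List (Int × Int)) (p : Int × (Int × Int)) =>
      if p.2.1 < 0 ∧ 0 < p.2.2 then
        (some p.1, st.2 ++ (match st.1 with | some q => [(q, p.1)] | none => []))
      else st)
    (none, [])).2

-- ===== PRECONDITION & SPEC =====
def Spec_getPeriods (sequence : List Int) (out : List (Int × Int)) : Prop := out = getPeriods_alt sequence
instance (sequence : List Int) (out : List (Int × Int)) : Decidable (Spec_getPeriods sequence out) := by unfold Spec_getPeriods; infer_instance

-- ===== CLAIM (what is proved, stated in full; the proofs are below) =====
def Claim_equal_getPeriods : Prop := ∀ (sequence : List Int), Dom_getPeriods sequence → Spec_getPeriods sequence (getPeriods sequence)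

-- ===== LEMMAS AND PROOFS =====

-- consecutive-pair builder threading the last crossing index, mirroring B's state
def pvPairs : Option Int → List Int → List (Int × Int)
  | _, [] => []
  | none, i :: t => pvPairs (some i) t
  | some q, i :: t => (q, i) :: pvPairs (some i) t

def pvLast : Option Int → List Int → Option Int
  | p, [] => p
  | _, i :: t => pvLast (some i) t

lemma pvPairs_some (q : Int) (z : List Int) : pvPairs (some q) z = (q :: z).zip z := by
  induction z generalizing q with
  | nil => rfl
  | cons i t ih => simp [pvPairs, ih]

lemma pvPairs_none (z : List Int) : pvPairs none z = z.zip z.tail := by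
  cases z with
  | nil => rfl
  | cons i t => simp [pvPairs, pvPairs_some]

lemma pvLoopB (L : List (Int × (Int × Int))) (prev : Option Int) (acc : List (Int × Int)) :
    L.foldl
      (fun (st : Option Int × List (Int × Int)) (p : Int × (Int × Int)) =>
        if p.2.1 < 0 ∧ 0 < p.2.2 then
          (some p.1, st.2 ++ (match st.1 with | some q => [(q, p.1)] | none => []))
        else st)
      (prev, acc)
    = (pvLast prev ((L.filter (fun p => decide (p.2.1 < 0 ∧ 0 < p.2.2))).map (·.1)),
       acc ++ pvPairs prev ((L.filter (fun p => decide (p.2.1 < 0 ∧ 0 < p.2.2))).map (·.1))) := by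
  induction L generalizing prev acc with
  | nil => simp [pvPairs, pvLast]
  | cons p t ih =>
    by_cases h : p.2.1 < 0 ∧ 0 < p.2.2
    · cases prev <;> simp [h, ih, pvPairs, pvLast]
    · simp [h, ih]

lemma pvEnumShift {α : Type} (xs : List α) (s t : Int) :
    PySem.List.enumerate xs (s + t) = (PySem.List.enumerate xs t).map (fun p => (p.1 + s, p.2)) := by
  induction xs generalizing t with
  | nil => simp [PySem.List.enumerate_nil]
  | cons x xs ih =>
    rw [PySem.List.enumerate_cons, PySem.List.enumerate_cons]
    simp only [List.map_cons]
    rw [show s + t + 1 = s + (t + 1) by ring, ih (t + 1), show s + t = t + s by ring]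

lemma pvZerosEq (s : List Int) :
    ((PySem.List.enumerate (s.zip (PySem.List.slice s (some 1))) 1).filter
        (fun p => decide (p.2.1 < 0 ∧ 0 < p.2.2))).map (·.1)
    = (PySem.List.pyRange 1 (s.length : Int)).filter
        (fun i => decide (PySem.List.pyGetD s (i - 1) 0 < 0 ∧ 0 < PySem.List.pyGetD s i 0)) := by
  have hsl : PySem.List.slice s (some 1) = s.tail := by
    rw [PySem.List.slice_from s (by norm_num)]; simp [List.drop_one]
  have he : PySem.List.enumerate (s.zip s.tail) 1
      = (PySem.List.enumerate (s.zip s.tail) 0).map (fun p => (p.1 + 1, p.2)) := by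
    simpa using pvEnumShift (s.zip s.tail) 1 0
  rw [hsl, he, PySem.List.enumerate_eq_map_pyRange (d := ((0 : Int), (0 : Int))),
      PySem.List.pyRange_one, PySem.List.pyRange_one]
  simp only [List.map_map, List.filter_map, List.map_map]
  have hlen : (PySem.List.len (s.zip s.tail) - 0).toNat = ((s.length : Int) - 1).toNat := by
    simp [PySem.List.len]
  rw [hlen]
  have hM : forall k, k ∈ List.range ((s.length : Int) - 1).toNat → k + 1 < s.length := by
    intro k hk; simp [List.mem_range] at hk; omega
  have hz : forall k : Nat, k + 1 < s.length →
      PySem.List.pyGetD (s.zip s.tail) ((k : Nat) : Int) (0, 0)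
        = (s.getD k 0, s.getD (k + 1) 0) := by
    intro k hk
    rw [PySem.List.pyGetD_natCast]
    have h1 : k < (s.zip s.tail).length := by simp [List.length_zip]; omega
    rw [List.getD_eq_getElem _ _ h1, List.getElem_zip, List.getElem_tail,
        List.getD_eq_getElem _ _ (by omega), List.getD_eq_getElem _ _ (by omega)]
  have hfil : forall k, k ∈ List.range ((s.length : Int) - 1).toNat →
      (((fun p => decide (p.2.1 < 0 ∧ 0 < p.2.2)) ∘
          (fun p => (p.1 + 1, p.2)) ∘ (fun j => (j, PySem.List.pyGetD (s.zip s.tail) j (0, 0)))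
          ∘ fun k : Nat => (0 : Int) + (k : Int)) k)
      = (((fun i => decide (PySem.List.pyGetD s (i - 1) 0 < 0 ∧ 0 < PySem.List.pyGetD s i 0))
          ∘ fun k : Nat => (1 : Int) + (k : Int)) k) := by
    intro k hk
    have hk1 := hM k hk
    simp only [Function.comp_apply, zero_add]
    rw [show (1 : Int) + (k : Int) - 1 = ((k : Nat) : Int) by ring,
        show (1 : Int) + (k : Int) = (((k + 1) : Nat) : Int) by push_cast; ring]
    have hgd : PySem.List.pyGetD s ((k : Int) + 1) 0 = s.getD (k + 1) 0 := by
      rw [show ((k : Int) + 1) = (((k + 1) : Nat) : Int) by push_cast; ring,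
          PySem.List.pyGetD_natCast]
    simp [hz k hk1, PySem.List.pyGetD_natCast, hgd]
  rw [List.filter_congr hfil]
  apply List.map_congr_left
  intro k hk
  simp only [Function.comp_apply, zero_add]
  omega

lemma pvAdjPairs (z : List Int) :
    (PySem.List.pyRange 1 (z.length : Int)).foldl
      (fun acc i => acc ++ [(PySem.List.pyGetD z (i - 1) 0, PySem.List.pyGetD z i 0)]) []
    = z.zip z.tail := by
  rw [PySem.List.foldl_append_singleton_eq_map, PySem.List.pyRange_one, List.map_map, List.nil_append]
  apply List.ext_getElem
  · simp
  · intro k h1 h2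
    simp only [List.getElem_map, List.getElem_range, Function.comp_apply, List.getElem_zip,
      List.getElem_tail]
    have hk : k < z.length - 1 := by simp at h1; omega
    rw [show (1 : Int) + ↑k - 1 = ((k : Nat) : Int) by ring,
        show (1 : Int) + ↑k = (((k+1) : Nat) : Int) by push_cast; ring,
        PySem.List.pyGetD_eq_getElem (h0 := by positivity) (h1 := by exact_mod_cast by omega),
        PySem.List.pyGetD_eq_getElem (h0 := by positivity) (h1 := by exact_mod_cast by omega)]
    simp

-- ===== VERDICT (by name: the statement is the Claim_ definition above) =====
theorem getPeriods_spec : Claim_equal_getPeriods := by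
  intro s _
  unfold Spec_getPeriods getPeriods getPeriods_alt
  rw [pvLoopB, pvZerosEq]
  simp only [PySem.List.foldl_append_ite_eq_filter, List.nil_append]
  rw [pvAdjPairs, pvPairs_none]
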